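-- pv_equiv track=rewrite | github.com/ivanfarevalo/Edge_Detection | Algorithmic_Toolbox_C1/W3_Greedy_Algorithms/max_num_prizes.py | calc_max_num_prizes
-- ===== SOURCE A (Python) =====
-- def calc_max_num_prizes(n):
--
--     if n <= 2:
--         return 1, [n]
--
--     min_prize_size = 1
--     prizes = []
--
--     while(n > 0):
--
--         if n - min_prize_size > min_prize_size:
--             prizes.append(min_prize_size)
--             n -= min_prize_size
--             min_prize_size += 1
--         else:
--             prizes.append(n)
--             n = 0
--
--     return len(prizes), prizes
-- ===== SOURCE B (Python) =====
-- from math import isqrt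
--
-- def calc_max_num_prizes(n):
--     if n <= 2:
--         return 1, [n]
--     k = (isqrt(8 * n + 1) - 1) // 2
--     return k, list(range(1, k)) + [n - (k - 1) * k // 2]
-- ===== Notes on version B (the rewrite author's own statement) =====
-- stated objective: simpler
-- what changed: Replaces A's subtractive while-loop of successive append-and-decrement steps by a closed-form count k = (isqrt(8n+1)-1)//2 and a single range construction of the prize list plus its final remainder element.
import Mathlib
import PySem

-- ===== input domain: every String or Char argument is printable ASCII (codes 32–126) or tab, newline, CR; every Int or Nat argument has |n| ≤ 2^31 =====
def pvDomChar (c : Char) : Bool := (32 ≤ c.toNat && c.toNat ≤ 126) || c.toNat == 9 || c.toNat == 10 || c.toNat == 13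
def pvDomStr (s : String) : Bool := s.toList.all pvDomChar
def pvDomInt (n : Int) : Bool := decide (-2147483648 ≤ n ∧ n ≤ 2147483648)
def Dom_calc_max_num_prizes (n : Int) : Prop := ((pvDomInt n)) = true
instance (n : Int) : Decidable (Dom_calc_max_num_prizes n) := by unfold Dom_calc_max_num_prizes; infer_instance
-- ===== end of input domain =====

-- B replaces A's subtractive while-loop by a closed-form count k = (isqrt(8n+1)-1)//2
-- plus a range construction (objective: simpler / constant-factor faster list build).

-- ===== PORT A =====
-- the while loop of A: state (n, min_prize_size, prizes); hm is only for termination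
def calcLoop (n m : Int) (prizes : List Int) (hm : 1 ≤ m) : List Int :=
  if _h : n > 0 then
    if n - m > m then
      calcLoop (n - m) (m + 1) (prizes ++ [m]) (by omega)
    else
      prizes ++ [n]
  else prizes
termination_by n.toNat
decreasing_by omega

def calc_max_num_prizes (n : Int) : Int × List Int :=
  if n ≤ 2 then (1, [n])
  else
    let prizes := calcLoop n 1 [] (by omega)
    ((prizes.length : Int), prizes)

-- ===== PORT B =====
-- math.isqrt on a nonnegative int is exactly Nat.sqrt of its toNat
def calc_max_num_prizes_alt (n : Int) : Int × List Int :=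
  if n ≤ 2 then (1, [n])
  else
    let k : Int := PySem.Int.floordiv ((Nat.sqrt (8 * n + 1).toNat : Int) - 1) 2
    (k, PySem.List.pyRange 1 k 1 ++ [n - PySem.Int.floordiv ((k - 1) * k) 2])

-- ===== PRECONDITION & SPEC =====
def Spec_calc_max_num_prizes (n : Int) (out : Int × List Int) : Prop := out = calc_max_num_prizes_alt n
instance (n : Int) (out : Int × List Int) : Decidable (Spec_calc_max_num_prizes n out) := by unfold Spec_calc_max_num_prizes; infer_instance

-- ===== CLAIM (what is proved, stated in full; the proofs are below) =====
def Claim_equal_calc_max_num_prizes : Prop := ∀ (n : Int), Dom_calc_max_num_prizes n → Spec_calc_max_num_prizes n (calc_max_num_prizes n)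

-- ===== LEMMAS AND PROOFS =====

-- A's loop, started at step m with remaining amount N - (m-1)*m/2, produces
-- [m, …, k-1, N - (k-1)*k/2] whenever k*(k+1) ≤ 2N < (k+1)*(k+2) and m ≤ k.
theorem calcLoop_char (k m N : Int) (acc : List Int) (hm : 1 ≤ m)
    (hmk : m ≤ k) (h1 : k * (k + 1) ≤ 2 * N) (h2 : 2 * N < (k + 1) * (k + 2)) :
    calcLoop (N - (m - 1) * m / 2) m acc hm =
      acc ++ PySem.List.pyRange m k 1 ++ [N - (k - 1) * k / 2] := by
  have hd : (m - 1) * m % 2 = 0 := by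
    have h := Int.even_mul_succ_self (m - 1)
    rw [show m - 1 + 1 = m from by ring] at h
    exact Int.even_iff.mp h
  rcases eq_or_lt_of_le hmk with heq | hlt
  · subst heq
    rw [calcLoop]
    have hnpos : N - (m - 1) * m / 2 > 0 := by
      nlinarith [Int.mul_ediv_add_emod ((m - 1) * m) 2]
    rw [dif_pos hnpos, if_neg (by nlinarith [Int.mul_ediv_add_emod ((m - 1) * m) 2]),
        PySem.List.pyRange_one_eq_nil (le_refl m)]
    simp
  · rw [calcLoop]
    have hnpos : N - (m - 1) * m / 2 > 0 := by
      nlinarith [Int.mul_ediv_add_emod ((m - 1) * m) 2]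
    rw [dif_pos hnpos, if_pos (by nlinarith [Int.mul_ediv_add_emod ((m - 1) * m) 2])]
    have harg : N - (m - 1) * m / 2 - m = N - (m + 1 - 1) * (m + 1) / 2 := by
      have hd' : m * (m + 1) % 2 = 0 := Int.even_iff.mp (Int.even_mul_succ_self m)
      have e1 : (m + 1 - 1) * (m + 1) = m * (m + 1) := by ring
      have e2 : m * (m + 1) = (m - 1) * m + 2 * m := by ring
      omega
    rw [harg, calcLoop_char k (m + 1) N (acc ++ [m]) (by omega) (by omega) h1 h2,
        PySem.List.pyRange_one_cons hlt]
    simp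
termination_by (k - m).toNat
decreasing_by omega

-- the closed-form k of B is exactly the greatest k with k*(k+1)/2 ≤ n (for n > 2)
theorem sqrt_k_char (n : Int) (hn : 2 < n) :
    let k : Int := PySem.Int.floordiv ((Nat.sqrt (8 * n + 1).toNat : Int) - 1) 2
    1 ≤ k ∧ k * (k + 1) ≤ 2 * n ∧ 2 * n < (k + 1) * (k + 2) := by
  intro k
  set M : Nat := (8 * n + 1).toNat with hM
  have hM8 : (M : Int) = 8 * n + 1 := by omega
  set s : Int := (Nat.sqrt M : Int) with hsdef
  have hs1' : s * s ≤ 8 * n + 1 := by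
    have h := Nat.sqrt_le' M
    rw [pow_two] at h
    rw [hsdef, ← hM8]; exact_mod_cast h
  have hs2' : 8 * n + 1 < (s + 1) * (s + 1) := by
    have h := Nat.lt_succ_sqrt' M
    rw [Nat.succ_eq_add_one, pow_two] at h
    rw [hsdef, ← hM8]; exact_mod_cast h
  have hs0 : 0 ≤ s := by positivity
  have hk : k = (s - 1) / 2 := by
    simp only [k, PySem.Int.floordiv_eq_ediv_of_pos (by norm_num : (0:Int) < 2)]
    rfl
  have hs4 : 4 ≤ s := by nlinarith
  constructor
  · omega
  constructor
  · nlinarith [Int.mul_ediv_add_emod (s - 1) 2, Int.emod_nonneg (s - 1) (by norm_num : (2:Int) ≠ 0),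
      Int.emod_lt_of_pos (s - 1) (by norm_num : (0:Int) < 2)]
  · nlinarith [Int.mul_ediv_add_emod (s - 1) 2, Int.emod_nonneg (s - 1) (by norm_num : (2:Int) ≠ 0),
      Int.emod_lt_of_pos (s - 1) (by norm_num : (0:Int) < 2)]

-- ===== VERDICT (by name: the statement is the Claim_ definition above) =====
theorem calc_max_num_prizes_spec : Claim_equal_calc_max_num_prizes := by
  intro n _
  unfold Spec_calc_max_num_prizes calc_max_num_prizes calc_max_num_prizes_alt
  by_cases h : n ≤ 2
  · simp [h]
  · simp only [if_neg h]
    obtain ⟨hk1, hkl, hkh⟩ := sqrt_k_char n (by omega)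
    set k : Int := PySem.Int.floordiv ((Nat.sqrt (8 * n + 1).toNat : Int) - 1) 2 with hkdef
    have harg : n = n - (1 - 1) * 1 / 2 := by norm_num
    have hloop : calcLoop n 1 [] (by omega) =
        PySem.List.pyRange 1 k 1 ++ [n - (k - 1) * k / 2] := by
      conv_lhs => rw [show calcLoop n 1 [] (by omega) =
        calcLoop (n - (1 - 1) * 1 / 2) 1 [] (by omega) from by norm_num]
      rw [calcLoop_char k 1 n [] (by omega) hk1 hkl hkh]; simp
    have hfd : PySem.Int.floordiv ((k - 1) * k) 2 = (k - 1) * k / 2 :=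
      PySem.Int.floordiv_eq_ediv_of_pos (by norm_num)
    rw [hloop, hfd]
    refine Prod.ext ?_ rfl
    simp [PySem.List.length_pyRange_one]
    omega
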